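-- pv_equiv track=rewrite | github.com/ayanahmad04/calico-spring-2026 | cross_solution (1).py | solve
-- ===== SOURCE A (Python) =====
-- def solve(N, M):
--     """
--     Create an N x M grid such that every valid cross contains 0-4 exactly once.
--
--     N: number of rows in the grid
--     M: number of columns in the grid
--     """
--     # YOUR CODE HERE
--
--     LABEL = []
--
--     for i in range(N):
--         STORE = []
--
--         for j in range(M):
--             STORE.append((2 * i + j) % 5)
--
--         LABEL.append(STORE)
--
--     return LABEL
-- ===== SOURCE B (Python) =====
-- def solve(N, M):
--     """
--     Create an N x M grid such that every valid cross contains 0-4 exactly once.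
--
--     N: number of rows in the grid
--     M: number of columns in the grid
--     """
--     if N <= 0:
--         return []
--     cols = max(M, 0)
--     # one periodic pattern, long enough to start at any offset 0..4
--     pat = [k % 5 for k in range(cols + 4)]
--     return [pat[(2 * i) % 5 : (2 * i) % 5 + cols] for i in range(N)]
-- ===== Notes on version B (the rewrite author's own statement) =====
-- stated objective: alternative
-- what changed: B precomputes a single periodic pattern list pat[k]=k%5 once and builds each row by slicing it at offset (2*i)%5, instead of A's nested loop recomputing (2*i+j)%5 per cell.
import Mathlib
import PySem

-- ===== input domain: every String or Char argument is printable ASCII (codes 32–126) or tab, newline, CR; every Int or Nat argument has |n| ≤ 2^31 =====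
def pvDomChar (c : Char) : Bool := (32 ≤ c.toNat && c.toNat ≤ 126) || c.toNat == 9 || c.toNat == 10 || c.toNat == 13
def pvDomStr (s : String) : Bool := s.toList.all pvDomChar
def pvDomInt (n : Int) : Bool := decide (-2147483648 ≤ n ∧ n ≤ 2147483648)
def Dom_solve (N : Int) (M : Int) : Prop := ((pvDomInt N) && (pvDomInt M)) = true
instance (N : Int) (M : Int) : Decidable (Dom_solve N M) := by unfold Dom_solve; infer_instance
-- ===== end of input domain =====

-- B builds each row by slicing one precomputed periodic pattern at offset (2*i)%5, instead of A's nested per-cell loop (objective: alternative).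

-- ===== PORT A =====
def solve (N : Int) (M : Int) : List (List Int) :=
  (PySem.List.pyRange 0 N 1).foldl
    (fun LABEL i =>
      LABEL ++ [(PySem.List.pyRange 0 M 1).foldl
        (fun STORE j => STORE ++ [PySem.Int.mod (2 * i + j) 5]) []])
    []

-- ===== PORT B =====
def solve_alt (N : Int) (M : Int) : List (List Int) :=
  if N ≤ 0 then [] else
  let cols : Int := max M 0
  let pat : List Int := (PySem.List.pyRange 0 (cols + 4) 1).map (fun k => PySem.Int.mod k 5)
  (PySem.List.pyRange 0 N 1).map (fun i =>
    PySem.List.slice pat (some (PySem.Int.mod (2 * i) 5)) (some (PySem.Int.mod (2 * i) 5 + cols)))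

-- ===== PRECONDITION & SPEC =====
def Spec_solve (N : Int) (M : Int) (out : List (List Int)) : Prop := out = solve_alt N M
instance (N : Int) (M : Int) (out : List (List Int)) : Decidable (Spec_solve N M out) := by unfold Spec_solve; infer_instance

-- ===== CLAIM (what is proved, stated in full; the proofs are below) =====
def Claim_equal_solve : Prop := ∀ (N : Int) (M : Int), Dom_solve N M → Spec_solve N M (solve N M)

-- ===== LEMMAS AND PROOFS =====

theorem pv_foldl_append_map {α β : Type} (f : α → β) (l : List α) (init : List β) :
    l.foldl (fun acc x => acc ++ [f x]) init = init ++ l.map f := by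
  induction l generalizing init with
  | nil => simp
  | cons a t ih => simp [List.foldl, ih]

-- one row of B equals one row of A, for every integer i and M
theorem pv_row (i M : Int) :
    PySem.List.slice
      ((PySem.List.pyRange 0 (max M 0 + 4) 1).map (fun k => PySem.Int.mod k 5))
      (some (PySem.Int.mod (2 * i) 5)) (some (PySem.Int.mod (2 * i) 5 + max M 0)) =
    (PySem.List.pyRange 0 M 1).map (fun j => PySem.Int.mod (2 * i + j) 5) := by
  have h5 : (0:Int) < 5 := by norm_num
  have hoff0 : 0 ≤ PySem.Int.mod (2 * i) 5 := PySem.Int.mod_nonneg _ h5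
  have hoff5 : PySem.Int.mod (2 * i) 5 < 5 := PySem.Int.mod_lt _ h5
  set off := PySem.Int.mod (2 * i) 5 with hoffdef
  have hocast : off = ((off.toNat : Nat) : Int) := by omega
  have hccast : max M 0 = (((max M 0).toNat : Nat) : Int) := by omega
  set o := off.toNat
  set c := (max M 0).toNat
  rw [hocast, hccast, PySem.List.slice_natCast_add]
  have hc4 : ((c:Int) + 4) = ((c + 4 : Nat) : Int) := by push_cast; ring
  rw [hc4, PySem.List.pyRange_zero_nat]
  apply List.ext_getElem
  · simp [PySem.List.length_pyRange_one]
    omega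
  · intro k hk1 hk2
    have hko : o + k < c + 4 := by
      simp at hk1
      omega
    simp only [List.getElem_take, List.getElem_drop, List.getElem_map,
      List.getElem_range, PySem.List.getElem_pyRange_one]
    rw [PySem.Int.mod_eq_emod_of_pos h5, PySem.Int.mod_eq_emod_of_pos h5]
    have : (o:Int) = (2*i) % 5 := by
      rw [hocast.symm, hoffdef, PySem.Int.mod_eq_emod_of_pos h5]
    push_cast
    omega

theorem solve_eq (N M : Int) : solve N M = solve_alt N M := by
  unfold solve solve_alt
  by_cases hN : N ≤ 0
  · simp [hN, PySem.List.pyRange_one_eq_nil hN]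
  simp only [hN, if_false]
  rw [pv_foldl_append_map (fun i => (PySem.List.pyRange 0 M 1).foldl
        (fun STORE j => STORE ++ [PySem.Int.mod (2 * i + j) 5]) [])]
  simp only [List.nil_append]
  refine List.map_congr_left ?_
  intro i _
  rw [pv_foldl_append_map (fun j => PySem.Int.mod (2 * i + j) 5)]
  simp only [List.nil_append]
  exact (pv_row i M).symm

-- ===== VERDICT (by name: the statement is the Claim_ definition above) =====
theorem solve_spec : Claim_equal_solve := by
  intro N M _
  unfold Spec_solve
  exact solve_eq N M
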